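-- pv_equiv track=rewrite | github.com/aneetdutta/pathleakage_privacy | code/test/test1.py | remove_subsets_and_duplicates
-- ===== SOURCE A (Python) =====
-- def dict_to_tuple(dictionary):
--     """
--     Convert dictionary to tuple of sorted (key, value) pairs.
--     """
--     return tuple(sorted((key, tuple(value)) for key, value in dictionary.items()))
--
-- def remove_subsets_and_duplicates(list_of_arrays):
--     """
--     Remove arrays that are subsets of another array and remove identical arrays.
--     """
--     unique_arrays = []
--     for array1 in list_of_arrays:
--         is_subset_flag = False
--         tuple1 = dict_to_tuple(array1)
--         for array2 in unique_arrays: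
--             tuple2 = dict_to_tuple(array2)
--             if set(tuple1).issubset(set(tuple2)):
--                 is_subset_flag = True
--                 break
--         if not is_subset_flag:
--             unique_arrays = [arr for arr in unique_arrays if not set(dict_to_tuple(arr)).issubset(set(tuple1))]
--             unique_arrays.append(array1)
--     return unique_arrays
-- ===== SOURCE B (Python) =====
-- def remove_subsets_and_duplicates(list_of_arrays):
--     """
--     Remove arrays that are subsets of another array and remove identical arrays.
--     Offline formulation: build each dict's item-set once, then keep exactly the
--     dicts whose item-set is not contained in an earlier one's set (<=) and not
--     strictly contained in a later one's set (<); output keeps input order.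
--     """
--     sets = [{(k, tuple(v)) for k, v in d.items()} for d in list_of_arrays]
--     n = len(sets)
--     result = []
--     for i in range(n):
--         s = sets[i]
--         if any(s <= sets[j] for j in range(i)):
--             continue
--         if any(s <= sets[j] and not sets[j] <= s for j in range(i + 1, n)):
--             continue
--         result.append(list_of_arrays[i])
--     return result
-- ===== Notes on version B (the rewrite author's own statement) =====
-- stated objective: faster
-- what changed: A maintains a kept-list that it rebuilds online, re-sorting every kept dict's items into a tuple on every inner comparison; B computes each dict's item-set once up front and keeps dict i by a single closed per-index test (its set is contained in no earlier dict's set and strictly contained in no later dict's set), emitting survivors in input order.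
import Mathlib
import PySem

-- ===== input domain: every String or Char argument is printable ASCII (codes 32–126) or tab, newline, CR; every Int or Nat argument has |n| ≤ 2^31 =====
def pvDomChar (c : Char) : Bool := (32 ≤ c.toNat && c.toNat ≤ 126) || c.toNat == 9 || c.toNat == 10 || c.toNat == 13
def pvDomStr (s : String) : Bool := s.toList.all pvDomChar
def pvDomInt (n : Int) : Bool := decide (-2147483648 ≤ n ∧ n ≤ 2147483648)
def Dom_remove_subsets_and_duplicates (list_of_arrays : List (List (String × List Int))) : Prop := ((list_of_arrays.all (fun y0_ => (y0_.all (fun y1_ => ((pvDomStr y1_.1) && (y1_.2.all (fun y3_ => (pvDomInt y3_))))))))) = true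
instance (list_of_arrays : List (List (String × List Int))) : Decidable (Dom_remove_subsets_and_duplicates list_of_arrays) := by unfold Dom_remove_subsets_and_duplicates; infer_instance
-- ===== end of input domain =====

-- B replaces A's online kept-list rebuilding (which re-sorts every kept dict's items on every
-- comparison) by computing each dict's item-set once and one per-index keep test; measurably
-- faster by a constant factor, same O(n^2) subset checks.

-- ===== PORT A =====
def dict_to_tuple (dictionary : List (String × List Int)) : List (String × List Int) :=
  -- sorted(...) on (str, tuple) pairs: Python's lexicographic tuple order = first key, then second key
  PySem.List.sorted2 (PySem.Dict.items (PySem.Dict.ofList dictionary)) (fun p => p.1) (fun p => p.2) false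

def remove_subsets_and_duplicates (list_of_arrays : List (List (String × List Int))) : List (List (String × List Int)) :=
  list_of_arrays.foldl (fun unique_arrays array1 =>
    let tuple1 := dict_to_tuple array1
    -- inner 'for array2 … if …: flag = True; break' is the any-test (no other effects)
    let is_subset_flag := unique_arrays.any (fun array2 =>
      PySem.Set.issubset (PySem.Set.ofList tuple1) (PySem.Set.ofList (dict_to_tuple array2)))
    if is_subset_flag then unique_arrays
    else unique_arrays.filter (fun arr =>
      !(PySem.Set.issubset (PySem.Set.ofList (dict_to_tuple arr)) (PySem.Set.ofList tuple1))) ++ [array1]) []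

-- ===== PORT B =====
def remove_subsets_and_duplicates_alt (list_of_arrays : List (List (String × List Int))) : List (List (String × List Int)) :=
  let sets := list_of_arrays.map (fun d => PySem.Set.ofList (PySem.Dict.items (PySem.Dict.ofList d)))
  (List.range list_of_arrays.length).foldl (fun result i =>
    let s := sets.getD i []
    if (sets.take i).any (fun t => PySem.Set.issubset s t) then result
    else if (sets.drop (i+1)).any (fun t => PySem.Set.issubset s t && !(PySem.Set.issubset t s)) then result
    else result ++ [list_of_arrays.getD i []]) []

-- ===== PRECONDITION & SPEC =====
def Spec_remove_subsets_and_duplicates (list_of_arrays : List (List (String × List Int))) (out : List (List (String × List Int))) : Prop := out = remove_subsets_and_duplicates_alt list_of_arrays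
instance (list_of_arrays : List (List (String × List Int))) (out : List (List (String × List Int))) : Decidable (Spec_remove_subsets_and_duplicates list_of_arrays out) := by unfold Spec_remove_subsets_and_duplicates; infer_instance

-- ===== CLAIM (what is proved, stated in full; the proofs are below) =====
def Claim_equal_remove_subsets_and_duplicates : Prop := ∀ (list_of_arrays : List (List (String × List Int))), Dom_remove_subsets_and_duplicates list_of_arrays → Spec_remove_subsets_and_duplicates list_of_arrays (remove_subsets_and_duplicates list_of_arrays)

-- ===== LEMMAS AND PROOFS =====

-- the subset relation both programs decide between two dicts (item-set inclusion)
def pvItems (d : List (String × List Int)) : List (String × List Int) :=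
  PySem.Dict.items (PySem.Dict.ofList d)

def pvSet (d : List (String × List Int)) : PySem.Set (String × List Int) :=
  PySem.Set.ofList (pvItems d)

def pvR (a b : List (String × List Int)) : Bool :=
  PySem.Set.issubset (pvSet a) (pvSet b)

-- A's step, abstracted over the relation
def pvStep {α : Type} (r : α → α → Bool) (acc : List α) (a : α) : List α :=
  if acc.any (fun b => r a b) then acc else acc.filter (fun b => !r b a) ++ [a]

-- B's keep test for an element with the given prefix/suffix
def pvKeep {α : Type} (r : α → α → Bool) (pre : List α) (a : α) (post : List α) : Bool :=
  !(pre.any (fun b => r a b)) && !(post.any (fun b => r a b && !r b a))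

-- recursive form of B's selection
def pvSel {α : Type} (r : α → α → Bool) : List α → List α → List α
  | _, [] => []
  | pre, a :: rest =>
      if pvKeep r pre a rest then a :: pvSel r (pre ++ [a]) rest else pvSel r (pre ++ [a]) rest

lemma pvR_iff (a b : List (String × List Int)) :
    pvR a b = true ↔ ∀ x ∈ pvItems a, x ∈ pvItems b := by
  simp [pvR, pvSet, PySem.Set.issubset_iff, PySem.Set.mem_ofList]

lemma pvR_refl (a : List (String × List Int)) : pvR a a = true := by
  simp [pvR_iff]

lemma pvR_trans (a b c : List (String × List Int)) :
    pvR a b = true → pvR b c = true → pvR a c = true := by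
  simp only [pvR_iff]; intro h1 h2 x hx; exact h2 x (h1 x hx)

lemma pvTestA_eq (a b : List (String × List Int)) :
    PySem.Set.issubset (PySem.Set.ofList (dict_to_tuple a)) (PySem.Set.ofList (dict_to_tuple b)) = pvR a b := by
  have hmem : ∀ d x, x ∈ dict_to_tuple d ↔ x ∈ pvItems d := fun d x =>
    (PySem.List.sorted2_perm (pvItems d) (fun p => p.1) (fun p => p.2) false).mem_iff
  rw [Bool.eq_iff_iff, pvR_iff]
  simp only [PySem.Set.issubset_iff, PySem.Set.mem_ofList]
  constructor
  · intro h x hx; exact (hmem b x).mp (h x ((hmem a x).mpr hx))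
  · intro h x hx; exact (hmem b x).mpr (h x ((hmem a x).mp hx))

lemma pvPortA_eq (L : List (List (String × List Int))) :
    remove_subsets_and_duplicates L = L.foldl (pvStep pvR) [] := by
  unfold remove_subsets_and_duplicates
  congr 1
  funext unique_arrays array1
  simp only [pvStep, pvTestA_eq]

-- basic facts about pvSel
lemma pvSel_sub {α : Type} (r : α → α → Bool) (pre rest : List α) (p : α)
    (hp : p ∈ pvSel r pre rest) : p ∈ rest := by
  induction rest generalizing pre with
  | nil => simp [pvSel] at hp
  | cons x rest ih =>
      simp only [pvSel] at hp
      by_cases hk : pvKeep r pre x rest = true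
      · rw [if_pos hk] at hp
        rcases List.mem_cons.mp hp with h | h
        · exact h ▸ List.mem_cons_self
        · exact List.mem_cons_of_mem _ (ih _ h)
      · rw [if_neg hk] at hp
        exact List.mem_cons_of_mem _ (ih _ hp)

lemma pvSel_pre {α : Type} (r : α → α → Bool) (pre rest : List α) (p : α)
    (hp : p ∈ pvSel r pre rest) : ∀ c ∈ pre, r p c = false := by
  induction rest generalizing pre with
  | nil => simp [pvSel] at hp
  | cons x rest ih =>
      simp only [pvSel] at hp
      by_cases hk : pvKeep r pre x rest = true
      · rw [if_pos hk] at hp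
        rcases List.mem_cons.mp hp with h | h
        · subst h
          intro c hc
          have h1 : pre.any (fun b => r p b) = false := by
            simp only [pvKeep, Bool.and_eq_true, Bool.not_eq_true'] at hk
            exact hk.1
          simpa using List.any_eq_false.mp h1 c hc
        · intro c hc
          exact ih _ h c (List.mem_append_left _ hc)
      · rw [if_neg hk] at hp
        intro c hc
        exact ih _ hp c (List.mem_append_left _ hc)

lemma pvSel_pair {α : Type} (r : α → α → Bool)
    (pre rest : List α) (p b : α)
    (hp : p ∈ pvSel r pre rest) (hb : b ∈ pvSel r pre rest) (hrpb : r p b = true) :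
    r b p = true := by
  induction rest generalizing pre with
  | nil => simp [pvSel] at hp
  | cons x rest ih =>
      simp only [pvSel] at hp hb
      by_cases hk : pvKeep r pre x rest = true
      · rw [if_pos hk] at hp hb
        have hsuffix : ∀ c ∈ rest, r x c = true → r c x = true := by
          intro c hc hxc
          have h2 : rest.any (fun b => r x b && !r b x) = false := by
            simp only [pvKeep, Bool.and_eq_true, Bool.not_eq_true'] at hk
            exact hk.2
          have := List.any_eq_false.mp h2 c hc
          simpa [hxc] using this
        rcases List.mem_cons.mp hp with h1 | h1 <;> rcases List.mem_cons.mp hb with h2 | h2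
        · subst h1; subst h2; exact hrpb
        · subst h1
          exact hsuffix b (pvSel_sub r _ _ b h2) hrpb
        · subst h2
          have := pvSel_pre r _ _ p h1 b (List.mem_append_right _ (List.mem_singleton.mpr rfl))
          rw [this] at hrpb; cases hrpb
        · exact ih _ h1 h2
      · rw [if_neg hk] at hp hb
        exact ih _ hp hb

lemma pvKeep_append {α : Type} (r : α → α → Bool) (pre rest : List α) (x a : α) :
    pvKeep r pre x (rest ++ [a]) = (pvKeep r pre x rest && !(r x a && !r a x)) := by
  simp only [pvKeep, List.any_append, List.any_cons, List.any_nil, Bool.or_false, Bool.not_or,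
    Bool.and_assoc]

lemma pvSel_append {α : Type} (r : α → α → Bool) (pre rest : List α) (a : α) :
    pvSel r pre (rest ++ [a]) =
      (pvSel r pre rest).filter (fun x => !(r x a && !r a x)) ++
        (if pvKeep r (pre ++ rest) a [] then [a] else []) := by
  induction rest generalizing pre with
  | nil => simp [pvSel]
  | cons x rest ih =>
      simp only [List.cons_append, pvSel, pvKeep_append, ih (pre ++ [x]), List.append_assoc]
      by_cases hk : pvKeep r pre x rest = true <;>
        cases hxa : r x a <;> cases hax : r a x <;>
          simp [hk, hxa, hax]

lemma pvSel_pos {α : Type} (r : α → α → Bool) (d : α) (pre rest : List α) :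
    pvSel r pre rest =
      ((List.range rest.length).filter
          (fun i => pvKeep r (pre ++ rest.take i) (rest.getD i d) (rest.drop (i+1)))).map
        (fun i => rest.getD i d) := by
  induction rest generalizing pre with
  | nil => simp [pvSel]
  | cons x rest ih =>
      simp only [pvSel]
      rw [List.length_cons, List.range_succ_eq_map, List.filter_cons]
      have h0 : pvKeep r (pre ++ (x :: rest).take 0) x
          ((x :: rest).drop (0+1)) = pvKeep r pre x rest := by
        simp
      have htail :
          List.map (fun i => (x :: rest).getD i d)
            (List.filter
              (fun i => pvKeep r (pre ++ (x :: rest).take i) ((x :: rest).getD i d)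
                ((x :: rest).drop (i+1)))
              (List.map Nat.succ (List.range rest.length))) = pvSel r (pre ++ [x]) rest := by
        rw [List.filter_map, List.map_map, ih (pre ++ [x])]
        congr 1
        apply List.filter_congr
        intro i _
        simp [Function.comp, List.append_assoc]
      cases hk : pvKeep r pre x rest <;>
        simp only [h0, hk, if_true, Bool.false_eq_true, if_false, List.map_cons,
          List.getD_cons_zero, htail]

-- strict countP monotonicity (with a witness where q holds but p does not)
lemma pvCountP_lt {α : Type} (p q : α → Bool) (l : List α) (b : α)
    (hb : b ∈ l) (hpb : p b = false) (hqb : q b = true)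
    (hmono : ∀ x ∈ l, p x = true → q x = true) :
    l.countP p < l.countP q := by
  obtain ⟨l1, l2, rfl⟩ := List.append_of_mem hb
  rw [List.countP_append, List.countP_append, List.countP_cons, List.countP_cons, hpb, hqb]
  have h1 : l1.countP p ≤ l1.countP q :=
    List.countP_mono_left (fun x hx => hmono x (List.mem_append_left _ hx))
  have h2 : l2.countP p ≤ l2.countP q :=
    List.countP_mono_left (fun x hx => hmono x (List.mem_append_right _ (List.mem_cons_of_mem _ hx)))
  simp only [if_true, if_false, Bool.false_eq_true]
  omega

-- dominance: every input element has a kept superset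
lemma pvMaximalAux {α : Type} (r : α → α → Bool) (hrefl : ∀ a, r a a = true)
    (htrans : ∀ a b c, r a b = true → r b c = true → r a c = true) (d : α) (X : List α) :
    ∀ N i, i < X.length →
      X.countP (fun x => r (X.getD i d) x) * (X.length + 1) + i ≤ N →
      ∃ c ∈ pvSel r [] X, r (X.getD i d) c = true := by
  intro N
  induction N with
  | zero =>
      intro i hi hN
      exfalso
      have hmem : X.getD i d ∈ X := by
        rw [List.getD_eq_getElem _ _ hi]; exact List.getElem_mem hi
      have h1 : 0 < X.countP (fun x => r (X.getD i d) x) :=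
        List.countP_pos_iff.mpr ⟨_, hmem, hrefl _⟩
      have h2 := Nat.mul_le_mul_right (X.length + 1) h1
      omega
  | succ N ih =>
      intro i hi hN
      by_cases hk : pvKeep r (X.take i) (X.getD i d) (X.drop (i+1)) = true
      · refine ⟨X.getD i d, ?_, hrefl _⟩
        rw [pvSel_pos r d [] X]
        simp only [List.mem_map, List.mem_filter, List.mem_range]
        exact ⟨i, ⟨hi, by simpa using hk⟩, rfl⟩
      · cases hA : (X.take i).any (fun b => r (X.getD i d) b) with
        | true =>
            obtain ⟨cb, hcb, hrb⟩ := List.any_eq_true.mp hA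
            obtain ⟨j, hj, hjeq⟩ := List.getElem_of_mem hcb
            have hj2 : j < i := lt_of_lt_of_le hj (by simp [List.length_take])
            have hjn : j < X.length := hj2.trans hi
            have hXj : X.getD j d = cb := by
              rw [List.getD_eq_getElem _ _ hjn, ← hjeq, List.getElem_take]
            have hrij : r (X.getD i d) (X.getD j d) = true := hXj ▸ hrb
            have hcnt : X.countP (fun x => r (X.getD j d) x) ≤
                X.countP (fun x => r (X.getD i d) x) :=
              List.countP_mono_left (fun x _ hx => htrans _ _ _ hrij hx)
            have hmul := Nat.mul_le_mul_right (X.length + 1) hcnt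
            obtain ⟨c, hc, hrc⟩ := ih j hjn (by omega)
            exact ⟨c, hc, htrans _ _ _ hrij hrc⟩
        | false =>
            have hB : (X.drop (i+1)).any (fun b => r (X.getD i d) b && !r b (X.getD i d)) = true := by
              cases hB0 : (X.drop (i+1)).any (fun b => r (X.getD i d) b && !r b (X.getD i d)) with
              | true => rfl
              | false =>
                  exact absurd (by simp only [pvKeep, hA, hB0, Bool.not_false, Bool.and_self]) hk
            obtain ⟨cb, hcb, hrb⟩ := List.any_eq_true.mp hB
            obtain ⟨j0, hj0, hj0eq⟩ := List.getElem_of_mem hcb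
            have hjn : i + 1 + j0 < X.length := by
              have := hj0
              simp only [List.length_drop] at this
              omega
            have hXj : X.getD (i + 1 + j0) d = cb := by
              rw [List.getD_eq_getElem _ _ hjn, ← hj0eq, List.getElem_drop]
            rw [Bool.and_eq_true, Bool.not_eq_true'] at hrb
            have hrij : r (X.getD i d) (X.getD (i+1+j0) d) = true := hXj ▸ hrb.1
            have hrji : r (X.getD (i+1+j0) d) (X.getD i d) = false := hXj ▸ hrb.2
            have hcnt : X.countP (fun x => r (X.getD (i+1+j0) d) x) <
                X.countP (fun x => r (X.getD i d) x) :=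
              pvCountP_lt _ _ _ (X.getD i d) (by rw [List.getD_eq_getElem _ _ hi]; exact List.getElem_mem hi) hrji (hrefl _)
                (fun x _ hx => htrans _ _ _ hrij hx)
            have hstep2 : X.countP (fun x => r (X.getD (i+1+j0) d) x) * (X.length + 1) +
                (X.length + 1) ≤ X.countP (fun x => r (X.getD i d) x) * (X.length + 1) := by
              calc X.countP (fun x => r (X.getD (i+1+j0) d) x) * (X.length + 1) + (X.length + 1)
                  = (X.countP (fun x => r (X.getD (i+1+j0) d) x) + 1) * (X.length + 1) := by ring
                _ ≤ X.countP (fun x => r (X.getD i d) x) * (X.length + 1) :=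
                    Nat.mul_le_mul_right _ (Nat.succ_le_of_lt hcnt)
            obtain ⟨c, hc, hrc⟩ := ih (i+1+j0) hjn (by omega)
            exact ⟨c, hc, htrans _ _ _ hrij hrc⟩

lemma pvMaximal {α : Type} (r : α → α → Bool) (hrefl : ∀ a, r a a = true)
    (htrans : ∀ a b c, r a b = true → r b c = true → r a c = true) (X : List α) (b : α)
    (hb : b ∈ X) : ∃ c ∈ pvSel r [] X, r b c = true := by
  obtain ⟨i, hi, rfl⟩ := List.getElem_of_mem hb
  have hg : X.getD i X[i] = X[i] := List.getD_eq_getElem _ _ hi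
  have h := pvMaximalAux r hrefl htrans (X[i]) X
    (X.countP (fun x => r (X.getD i (X[i])) x) * (X.length + 1) + i) i hi le_rfl
  rw [hg] at h
  exact h

-- the core step lemma: A's step applied to the selection of X is the selection of X ++ [a]
lemma pvCore {α : Type} (r : α → α → Bool) (hrefl : ∀ a, r a a = true)
    (htrans : ∀ a b c, r a b = true → r b c = true → r a c = true) (X : List α) (a : α) :
    pvStep r (pvSel r [] X) a = pvSel r [] (X ++ [a]) := by
  rw [pvSel_append, pvStep]
  have hkeep : pvKeep r ([] ++ X) a [] = !(X.any (fun b => r a b)) := by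
    simp [pvKeep]
  cases h : (pvSel r [] X).any (fun b => r a b) with
  | true =>
      obtain ⟨b, hbmem, hrab⟩ := List.any_eq_true.mp h
      have hXany : X.any (fun b => r a b) = true :=
        List.any_eq_true.mpr ⟨b, pvSel_sub r [] X b hbmem, hrab⟩
      have hfil : List.filter (fun x => (!r x a || r a x)) (pvSel r [] X) = pvSel r [] X := by
        refine List.filter_eq_self.mpr ?_
        intro p hp
        by_cases hpa : r p a = true
        · have hpb : r p b = true := htrans _ _ _ hpa hrab
          have hbp : r b p = true := pvSel_pair r [] X p b hp hbmem hpb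
          have hap : r a p = true := htrans _ _ _ hrab hbp
          simp [hpa, hap]
        · have hpa' : r p a = false := by simpa using hpa
          simp [hpa']
      rw [hkeep, hXany]
      simp [hfil]
  | false =>
      have hXany : X.any (fun b => r a b) = false := by
        cases hX : X.any (fun b => r a b) with
        | false => rfl
        | true =>
            obtain ⟨b, hbmem, hrab⟩ := List.any_eq_true.mp hX
            obtain ⟨c, hcmem, hrbc⟩ := pvMaximal r hrefl htrans X b hbmem
            have hac : r a c = true := htrans _ _ _ hrab hrbc
            have := List.any_eq_true.mpr ⟨c, hcmem, hac⟩
            rw [h] at this; cases this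
      have hfil : List.filter (fun x => (!r x a || r a x)) (pvSel r [] X) =
          List.filter (fun b => !r b a) (pvSel r [] X) := by
        apply List.filter_congr
        intro p hp
        have hap : r a p = false := by
          cases hap : r a p with
          | false => rfl
          | true =>
              have := List.any_eq_true.mpr ⟨p, hp, hap⟩
              rw [h] at this; cases this
        simp [hap]
      rw [hkeep, hXany]
      simp [hfil]

lemma pvFoldl_eq {α : Type} (r : α → α → Bool) (hrefl : ∀ a, r a a = true)
    (htrans : ∀ a b c, r a b = true → r b c = true → r a c = true) (X : List α) :
    X.foldl (pvStep r) [] = pvSel r [] X := by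
  induction X using List.reverseRecOn with
  | nil => rfl
  | append_singleton X a ih =>
      rw [List.foldl_append, List.foldl_cons, List.foldl_nil, ih,
        pvCore r hrefl htrans]

-- B's port computes pvSel pvR [] L
lemma pvPortB_eq (L : List (List (String × List Int))) :
    remove_subsets_and_duplicates_alt L = pvSel pvR [] L := by
  have hdef : remove_subsets_and_duplicates_alt L =
      (List.range L.length).foldl (fun result i =>
        if ((L.map pvSet).take i).any
            (fun t => PySem.Set.issubset ((L.map pvSet).getD i []) t) then result
        else if ((L.map pvSet).drop (i+1)).any
            (fun t => PySem.Set.issubset ((L.map pvSet).getD i []) t &&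
              !(PySem.Set.issubset t ((L.map pvSet).getD i []))) then result
        else result ++ [L.getD i []]) [] := rfl
  rw [hdef]
  have hstep : ∀ i ∈ List.range L.length,
      ∀ (res : List (List (String × List Int))),
      (if ((L.map pvSet).take i).any
          (fun t => PySem.Set.issubset ((L.map pvSet).getD i []) t) then res
       else if ((L.map pvSet).drop (i+1)).any
          (fun t => PySem.Set.issubset ((L.map pvSet).getD i []) t &&
            !(PySem.Set.issubset t ((L.map pvSet).getD i []))) then res
       else res ++ [L.getD i []]) =
      (if pvKeep pvR ([] ++ L.take i) (L.getD i []) (L.drop (i+1))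
        then res ++ [L.getD i []] else res) := by
    intro i hi res
    have hin : i < L.length := List.mem_range.mp hi
    have hgetD : (L.map pvSet).getD i [] = pvSet (L.getD i []) := by
      rw [List.getD_eq_getElem _ _ (by simpa using hin), List.getD_eq_getElem _ _ hin,
        List.getElem_map]
    have e1 : ((L.map pvSet).take i).any
        (fun t => PySem.Set.issubset ((L.map pvSet).getD i []) t) =
        (L.take i).any (fun b => pvR (L.getD i []) b) := by
      rw [hgetD, ← List.map_take, List.any_map]; rfl
    have e2 : ((L.map pvSet).drop (i+1)).any
        (fun t => PySem.Set.issubset ((L.map pvSet).getD i []) t &&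
          !(PySem.Set.issubset t ((L.map pvSet).getD i []))) =
        (L.drop (i+1)).any (fun b => pvR (L.getD i []) b && !pvR b (L.getD i [])) := by
      rw [hgetD, ← List.map_drop, List.any_map]; rfl
    rw [e1, e2, show pvKeep pvR ([] ++ L.take i) (L.getD i []) (L.drop (i+1)) =
      (!(L.take i).any (fun b => pvR (L.getD i []) b) &&
       !(L.drop (i+1)).any (fun b => pvR (L.getD i []) b && !pvR b (L.getD i []))) from rfl]
    rcases Bool.eq_false_or_eq_true ((L.take i).any (fun b => pvR (L.getD i []) b)) with hb1 | hb1 <;>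
      rcases Bool.eq_false_or_eq_true
        ((L.drop (i+1)).any (fun b => pvR (L.getD i []) b && !pvR b (L.getD i []))) with hb2 | hb2 <;>
        rw [hb1, hb2] <;> rfl
  rw [PySem.List.foldl_congr_mem' (List.range L.length) _
    (fun res i => if pvKeep pvR ([] ++ L.take i) (L.getD i []) (L.drop (i+1))
      then res ++ [L.getD i []] else res) [] hstep]
  rw [PySem.List.foldl_append_if
    (p := fun i => pvKeep pvR ([] ++ L.take i) (L.getD i []) (L.drop (i+1)))
    (f := fun i => L.getD i [])]
  rw [pvSel_pos pvR ([] : List (String × List Int)) [] L]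
  simp only [List.nil_append]

-- ===== VERDICT (by name: the statement is the Claim_ definition above) =====
theorem remove_subsets_and_duplicates_spec : Claim_equal_remove_subsets_and_duplicates := by
  intro L _
  unfold Spec_remove_subsets_and_duplicates
  rw [pvPortA_eq, pvPortB_eq, pvFoldl_eq pvR pvR_refl pvR_trans]
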